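-- pv_equiv track=rewrite | github.com/IRepeva/Test-tasks-for-Ramax | badcode.py | isFunnyFunction
-- ===== SOURCE A (Python) =====
-- def isFunnyFunction(data):
--     if data:
--         if all(int(a) == int(b) + 1 for a, b in zip(data, data[1:])):
--             return True
--         elif all(int(a) == int(b) - 1 for a, b in zip(data, data[1:])):
--             return True
--         elif all(int(a) == int(b) for a, b in zip(data, data[1:])):
--             return True
--         else:
--             return False
--     else:
--         raise ValueError("data is None")
-- ===== SOURCE B (Python) =====
-- def isFunnyFunction(data):
--     if not data:
--         raise ValueError("data is None")
--     expected = None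
--     prev = data[0]
--     for x in data[1:]:
--         d = int(prev) - int(x)
--         if expected is None:
--             if d not in (-1, 0, 1):
--                 return False
--             expected = d
--         elif d != expected:
--             return False
--         prev = x
--     return True
-- ===== Notes on version B (the rewrite author's own statement) =====
-- stated objective: simpler
-- what changed: Replaces A's three separate full scans of the pair list (+1, -1, 0) by one single pass that fixes the expected direction from the first pair and checks every later pair against it.
import Mathlib
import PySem

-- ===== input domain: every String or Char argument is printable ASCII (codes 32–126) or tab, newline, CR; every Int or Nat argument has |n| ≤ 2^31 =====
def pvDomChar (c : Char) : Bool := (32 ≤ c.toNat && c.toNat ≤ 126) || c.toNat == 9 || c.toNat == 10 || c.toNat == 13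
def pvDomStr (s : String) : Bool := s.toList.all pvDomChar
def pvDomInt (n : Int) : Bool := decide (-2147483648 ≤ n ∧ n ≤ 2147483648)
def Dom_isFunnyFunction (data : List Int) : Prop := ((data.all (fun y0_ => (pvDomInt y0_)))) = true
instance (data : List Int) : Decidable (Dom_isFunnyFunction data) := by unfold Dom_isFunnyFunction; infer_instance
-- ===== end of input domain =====

-- B replaces A's three full scans by a single pass tracking the first pair's direction (objective: simpler).


-- ===== PORT A =====
def isFunnyFunction (data : List Int) : Bool :=
  let pairs := data.zip (data.drop 1)
  if pairs.all (fun p => p.1 == p.2 + 1) then true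
  else if pairs.all (fun p => p.1 == p.2 - 1) then true
  else if pairs.all (fun p => p.1 == p.2) then true
  else false

-- ===== PORT B =====
-- single pass: first pair fixes the expected direction, later pairs must match it
def altLoop (expected : Option Int) (prev : Int) : List Int → Bool
  | [] => true
  | x :: rest =>
    let d := prev - x
    match expected with
    | none => if d ≠ -1 ∧ d ≠ 0 ∧ d ≠ 1 then false else altLoop (some d) x rest
    | some e => if d ≠ e then false else altLoop (some e) x rest

def isFunnyFunction_alt (data : List Int) : Bool :=
  match data with
  | [] => false            -- unreachable under Pre_ (Python B raises here, like A)
  | p :: rest => altLoop none p rest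

-- ===== PRECONDITION & SPEC =====
-- Pre_ excludes the empty list, on which A raises ValueError (B raises too)
def Pre_isFunnyFunction (data : List Int) : Prop := data ≠ []
instance (data : List Int) : Decidable (Pre_isFunnyFunction data) := by unfold Pre_isFunnyFunction; infer_instance
def pvWitness_isFunnyFunction : List Int := [3, 2, 1]

def Spec_isFunnyFunction (data : List Int) (out : Bool) : Prop := out = isFunnyFunction_alt data
instance (data : List Int) (out : Bool) : Decidable (Spec_isFunnyFunction data out) := by unfold Spec_isFunnyFunction; infer_instance

-- ===== CLAIM (what is proved, stated in full; the proofs are below) =====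
def Claim_equal_isFunnyFunction : Prop := ∀ (data : List Int), Dom_isFunnyFunction data → Pre_isFunnyFunction data → Spec_isFunnyFunction data (isFunnyFunction data)

-- ===== LEMMAS AND PROOFS =====

-- ===== VERDICT (by name: the statement is the Claim_ definition above) =====
lemma altLoop_some (e : Int) (prev : Int) (rest : List Int) :
    altLoop (some e) prev rest = ((prev :: rest).zip rest).all (fun p => p.1 == p.2 + e) := by
  induction rest generalizing prev with
  | nil => rfl
  | cons x rs ih =>
    simp only [altLoop, List.zip_cons_cons, List.all_cons, ih]
    by_cases h : prev - x = e
    · have : prev = x + e := by omega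
      simp [h, this]
    · have : ¬ prev = x + e := by omega
      simp [h, this]

theorem isFunnyFunction_spec : Claim_equal_isFunnyFunction := by
  intro data _ hpre
  unfold Spec_isFunnyFunction
  match data, hpre with
  | p :: rest, _ =>
    match rest with
    | [] => rfl
    | x :: rs =>
      simp only [isFunnyFunction, isFunnyFunction_alt, altLoop, List.drop_succ_cons,
        List.drop_zero, List.zip_cons_cons, List.all_cons]
      by_cases h1 : p - x = 1
      · have hpx : p = x + 1 := by omega
        have hno : ¬ (p - x ≠ -1 ∧ p - x ≠ 0 ∧ p - x ≠ 1) := by omega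
        have hc1 : ¬ ((x : Int) + 1 = x - 1) := by omega
        have hc2 : ¬ ((x : Int) + 1 = x) := by omega
        simp [hno, h1, altLoop_some, hpx, hc1, hc2]
      · by_cases h2 : p - x = -1
        · have hpx : p = x - 1 := by omega
          have hne : ¬ p = x + 1 := by omega
          have hno : ¬ (p - x ≠ -1 ∧ p - x ≠ 0 ∧ p - x ≠ 1) := by omega
          have hc1 : ¬ ((x : Int) - 1 = x + 1) := by omega
          have hs : (x : Int) - 1 = x + -1 := by ring
          simp only [hpx, h2]
          simp [hno, altLoop_some, hc1, hs, sub_eq_add_neg]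
        · by_cases h3 : p - x = 0
          · have hpx : p = x := by omega
            have hno : ¬ (p - x ≠ -1 ∧ p - x ≠ 0 ∧ p - x ≠ 1) := by omega
            have hc1 : ¬ ((x : Int) = x + 1) := by omega
            have hc2 : ¬ ((x : Int) = x - 1) := by omega
            simp [hno, h3, altLoop_some, hpx, hc1, hc2]
          · have hne1 : ¬ p = x + 1 := by omega
            have hne2 : ¬ p = x - 1 := by omega
            have hne3 : ¬ p = x := by omega
            have hout : (p - x ≠ -1 ∧ p - x ≠ 0 ∧ p - x ≠ 1) := by omega
            simp [hout, hne1, hne2, hne3]
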